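-- pv_equiv track=rewrite | github.com/vsolv/BigFin-1 | Bigflow/Core/models.py | validate_inject_xss_str
-- ===== SOURCE A (Python) =====
-- def validate_inject_xss_str(ty,value):
--     if ty == 'stringonly':
--         xss_str_arr =  ["<",">","!","@","#","$","%","^","&","*","(",")","[","]","{","}","?"]
--         for xss_str in xss_str_arr:
--             if xss_str in value:
--                 return False
--         return True
--     if ty == 'specialchar':
--         return True
--     if ty == 'numberonly':
--         return True
-- ===== SOURCE B (Python) =====
-- def validate_inject_xss_str(ty, value):
--     if ty == 'stringonly':
--         forbidden = set("<>!@#$%^&*()[]{}?")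
--         return not any(c in forbidden for c in value)
--     if ty == 'specialchar':
--         return True
--     if ty == 'numberonly':
--         return True
-- ===== Notes on version B (the rewrite author's own statement) =====
-- stated objective: idiomatic
-- what changed: B makes a single pass over value testing each character against a set of the 17 forbidden characters, instead of A's 17 substring scans of value; the final boolean is one negated any() rather than an early-return loop.
import Mathlib
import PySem

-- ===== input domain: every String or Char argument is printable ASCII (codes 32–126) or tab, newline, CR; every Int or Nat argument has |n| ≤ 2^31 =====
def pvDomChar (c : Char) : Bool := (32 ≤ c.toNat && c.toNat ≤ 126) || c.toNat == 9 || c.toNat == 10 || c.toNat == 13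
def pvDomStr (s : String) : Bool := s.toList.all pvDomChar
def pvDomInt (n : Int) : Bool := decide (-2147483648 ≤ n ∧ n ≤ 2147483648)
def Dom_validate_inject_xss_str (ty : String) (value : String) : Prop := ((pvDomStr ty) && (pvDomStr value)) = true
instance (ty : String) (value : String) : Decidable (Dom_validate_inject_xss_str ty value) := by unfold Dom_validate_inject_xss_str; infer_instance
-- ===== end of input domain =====

-- B tests each character of value once against a set of the 17 forbidden characters (one pass, idiomatic any), instead of A's 17 substring scans of value.

-- ===== PORT A =====
-- the literal list of forbidden one-character strings, as in A
def pvXssStrArr : List String :=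
  ["<", ">", "!", "@", "#", "$", "%", "^", "&", "*", "(", ")", "[", "]", "{", "}", "?"]

-- 'for xss_str in xss_str_arr: if xss_str in value: return False / return True'
def pvXssLoop : List String → String → Bool
  | [], _ => true
  | x :: rest, value => if PySem.Str.isIn x value then false else pvXssLoop rest value

def validate_inject_xss_str (ty : String) (value : String) : Option Bool :=
  if ty == "stringonly" then some (pvXssLoop pvXssStrArr value)
  else if ty == "specialchar" then some true
  else if ty == "numberonly" then some true
  else none

-- ===== PORT B =====
-- forbidden = set("<>!@#$%^&*()[]{}?")
def pvForbidden : PySem.Set Char := PySem.Set.ofList "<>!@#$%^&*()[]{}?".toList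

-- return not any(c in forbidden for c in value)
def validate_inject_xss_str_alt (ty : String) (value : String) : Option Bool :=
  if ty == "stringonly" then some (!(value.toList.any (fun c => pvForbidden.contains c)))
  else if ty == "specialchar" then some true
  else if ty == "numberonly" then some true
  else none

-- ===== PRECONDITION & SPEC =====
def Spec_validate_inject_xss_str (ty : String) (value : String) (out : Option Bool) : Prop := out = validate_inject_xss_str_alt ty value
instance (ty : String) (value : String) (out : Option Bool) : Decidable (Spec_validate_inject_xss_str ty value out) := by unfold Spec_validate_inject_xss_str; infer_instance

-- ===== CLAIM (what is proved, stated in full; the proofs are below) =====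
def Claim_equal_validate_inject_xss_str : Prop := ∀ (ty : String) (value : String), Dom_validate_inject_xss_str ty value → Spec_validate_inject_xss_str ty value (validate_inject_xss_str ty value)

-- ===== LEMMAS AND PROOFS =====

-- A's loop returns 'no forbidden string is a substring of value'
theorem pvXssLoop_eq_any (l : List String) (v : String) :
    pvXssLoop l v = !(l.any (fun x => PySem.Str.isIn x v)) := by
  induction l with
  | nil => simp [pvXssLoop]
  | cons x rest ih =>
      simp only [pvXssLoop, List.any_cons]
      cases h : PySem.Str.isIn x v <;> simp [ih]

-- a single character is a substring iff it is one of value's characters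
theorem isIn_singleton (c : Char) (v : String) :
    PySem.Chars.isIn [c] v.toList = v.toList.contains c := by
  cases h : v.toList.contains c
  · rw [PySem.Chars.isIn_eq_false_iff]
    intro hinf
    have hc : c ∈ v.toList := hinf.subset (by simp)
    simp [List.contains_eq_mem, hc] at h
  · have hc : c ∈ v.toList := by simpa [List.contains_eq_mem] using h
    obtain ⟨s, t, he⟩ := List.append_of_mem hc
    rw [PySem.Chars.isIn_iff_infix]
    exact ⟨s, t, by rw [he]; simp⟩

-- 'some list element of l occurs in m' is symmetric in l and m
theorem any_contains_comm (l m : List Char) :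
    l.any (fun x => m.contains x) = m.any (fun x => l.contains x) := by
  rw [Bool.eq_iff_iff]
  simp only [List.any_eq_true, List.contains_eq_mem, decide_eq_true_eq]
  exact ⟨fun ⟨x, h1, h2⟩ => ⟨x, h2, h1⟩, fun ⟨x, h1, h2⟩ => ⟨x, h2, h1⟩⟩

-- ===== VERDICT (by name: the statement is the Claim_ definition above) =====
theorem validate_inject_xss_str_spec : Claim_equal_validate_inject_xss_str := by
  intro ty value _
  unfold Spec_validate_inject_xss_str validate_inject_xss_str validate_inject_xss_str_alt
  by_cases hty : ty == "stringonly"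
  · simp only [hty, if_true]
    congr 1
    rw [pvXssLoop_eq_any]
    congr 1
    have : pvXssStrArr.any (fun x => PySem.Str.isIn x value)
        = ("<>!@#$%^&*()[]{}?".toList).any (fun c => value.toList.contains c) := by
      simp only [pvXssStrArr, List.any_cons, List.any_nil, PySem.Str.isIn_eq,
        show ("<" : String).toList = ['<'] from rfl, show (">" : String).toList = ['>'] from rfl, show ("!" : String).toList = ['!'] from rfl, show ("@" : String).toList = ['@'] from rfl, show ("#" : String).toList = ['#'] from rfl, show ("$" : String).toList = ['$'] from rfl, show ("%" : String).toList = ['%'] from rfl, show ("^" : String).toList = ['^'] from rfl, show ("&" : String).toList = ['&'] from rfl, show ("*" : String).toList = ['*'] from rfl, show ("(" : String).toList = ['('] from rfl, show (")" : String).toList = [')'] from rfl, show ("[" : String).toList = ['['] from rfl, show ("]" : String).toList = [']'] from rfl, show ("{" : String).toList = ['{'] from rfl, show ("}" : String).toList = ['}'] from rfl, show ("?" : String).toList = ['?'] from rfl, isIn_singleton]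
      rfl
    rw [this, any_contains_comm]
    rfl
  · simp [hty]
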